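-- pv_equiv track=rewrite | github.com/DavideVi/ClusterManager | server.py | type_response_from_data
-- ===== SOURCE A (Python) =====
-- def type_response_from_data(aggregate_data):
--
--     result = {}
--
--     for instance in aggregate_data:
--
--         # We have zone but we want region
--         instance_region = instance["instance_zone"][:-1]
--
--         # Adding type  to results if it does not exist
--         if instance["instance_type"] not in result:
--             result[instance["instance_type"]] = {}
--
--         # Adding type into region if it does not exist
--         if instance_region not in result[instance["instance_type"]]:
--             result[instance["instance_type"]][instance_region] = 1
--         # If it does, simply incrementing the counter
--         else:
--             result[instance["instance_type"]][instance_region] += 1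
--
--     return result
-- ===== SOURCE B (Python) =====
-- def type_response_from_data(aggregate_data):
--     # Pass 1: flat counter keyed by (type, region)
--     counts = {}
--     for instance in aggregate_data:
--         key = (instance["instance_type"], instance["instance_zone"][:-1])
--         counts[key] = counts.get(key, 0) + 1
--     # Pass 2: reshape the flat counter into the nested dict
--     result = {}
--     for (instance_type, region), count in counts.items():
--         result.setdefault(instance_type, {})[region] = count
--     return result
-- ===== Notes on version B (the rewrite author's own statement) =====
-- stated objective: alternative
-- what changed: A builds the nested dict directly with per-element membership tests and in-place increments; B is a two-pass reshape: pass one builds a flat counter keyed by the (type, region) tuple, pass two iterates the counter's items in first-occurrence order and reshapes them into the nested dict with setdefault.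
import Mathlib
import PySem

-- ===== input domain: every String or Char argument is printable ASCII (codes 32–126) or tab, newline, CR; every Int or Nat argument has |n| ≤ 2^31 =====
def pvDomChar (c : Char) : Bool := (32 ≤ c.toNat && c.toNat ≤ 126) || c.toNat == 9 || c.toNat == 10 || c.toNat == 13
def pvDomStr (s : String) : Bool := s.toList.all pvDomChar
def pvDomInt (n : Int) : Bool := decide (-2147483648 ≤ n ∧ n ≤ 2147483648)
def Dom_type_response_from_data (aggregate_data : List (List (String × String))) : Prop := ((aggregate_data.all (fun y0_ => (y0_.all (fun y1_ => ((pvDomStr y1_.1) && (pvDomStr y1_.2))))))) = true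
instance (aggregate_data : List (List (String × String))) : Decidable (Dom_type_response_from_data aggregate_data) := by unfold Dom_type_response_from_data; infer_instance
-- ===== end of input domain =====

-- B replaces A's single nested-dict building loop by a two-pass reshape: a flat counter
-- keyed by the (type, region) pair, then a reshape of the counter's items into the nested dict.

-- ===== PORT A =====
def type_response_from_data (aggregate_data : List (List (String × String))) : List (String × List (String × Int)) :=
  let result : PySem.Dict String (PySem.Dict String Int) :=
    aggregate_data.foldl (fun result instance_ =>
      let d := PySem.Dict.mk instance_
      -- instance["instance_zone"][:-1]  (key present under Pre_)
      let instance_region := PySem.Str.slice ((d.get? "instance_zone").getD "") none (some (-1))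
      let instance_type := (d.get? "instance_type").getD ""
      -- if instance["instance_type"] not in result: result[...] = {}
      let result := if result.contains instance_type then result
                    else result.insert instance_type PySem.Dict.empty
      let inner := result.getD instance_type PySem.Dict.empty
      -- if instance_region not in result[...]: = 1 else: += 1
      if !(inner.contains instance_region) then
        result.insert instance_type (inner.insert instance_region 1)
      else
        result.insert instance_type (inner.insert instance_region (inner.getD instance_region 0 + 1)))
      PySem.Dict.empty
  result.items.map (fun p => (p.1, p.2.items))

-- ===== PORT B =====
def type_response_from_data_alt (aggregate_data : List (List (String × String))) : List (String × List (String × Int)) :=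
  -- pass 1: counts[(type, region)] = counts.get(key, 0) + 1
  let counts : PySem.Dict (String × String) Int :=
    aggregate_data.foldl (fun counts instance_ =>
      let d := PySem.Dict.mk instance_
      let key := ((d.get? "instance_type").getD "",
                  PySem.Str.slice ((d.get? "instance_zone").getD "") none (some (-1)))
      counts.insert key (counts.getD key 0 + 1))
      PySem.Dict.empty
  -- pass 2: result.setdefault(t, {})[r] = count
  let result : PySem.Dict String (PySem.Dict String Int) :=
    counts.items.foldl (fun result q =>
      let result := result.setdefault q.1.1 PySem.Dict.empty
      result.insert q.1.1 ((result.getD q.1.1 PySem.Dict.empty).insert q.1.2 q.2))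
      PySem.Dict.empty
  result.items.map (fun p => (p.1, p.2.items))

-- ===== PRECONDITION & SPEC =====
-- Pre_ excludes exactly the instances missing the "instance_type" or "instance_zone" key,
-- on which the Python A raises KeyError.
def Pre_type_response_from_data (aggregate_data : List (List (String × String))) : Prop :=
  (aggregate_data.all (fun instance_ =>
    (PySem.Dict.mk instance_).contains "instance_type" &&
    (PySem.Dict.mk instance_).contains "instance_zone")) = true
instance (aggregate_data : List (List (String × String))) : Decidable (Pre_type_response_from_data aggregate_data) := by unfold Pre_type_response_from_data; infer_instance

def pvWitness_type_response_from_data : (List (List (String × String))) :=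
  [[("instance_type", "small"), ("instance_zone", "us-east-1a")],
   [("instance_type", "small"), ("instance_zone", "us-east-1b")]]

def Spec_type_response_from_data (aggregate_data : List (List (String × String))) (out : List (String × List (String × Int))) : Prop := out = type_response_from_data_alt aggregate_data
instance (aggregate_data : List (List (String × String))) (out : List (String × List (String × Int))) : Decidable (Spec_type_response_from_data aggregate_data out) := by unfold Spec_type_response_from_data; infer_instance

-- ===== CLAIM (what is proved, stated in full; the proofs are below) =====
def Claim_equal_type_response_from_data : Prop := ∀ (aggregate_data : List (List (String × String))), Dom_type_response_from_data aggregate_data → Pre_type_response_from_data aggregate_data → Spec_type_response_from_data aggregate_data (type_response_from_data aggregate_data)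

-- ===== LEMMAS AND PROOFS =====

-- the (type, region) pair A and B both extract from one instance dict
def pvPair (instance_ : List (String × String)) : String × String :=
  (((PySem.Dict.mk instance_).get? "instance_type").getD "",
   PySem.Str.slice (((PySem.Dict.mk instance_).get? "instance_zone").getD "") none (some (-1)))

-- A's loop body, on the extracted pair
def pvStepA (res : PySem.Dict String (PySem.Dict String Int)) (p : String × String) :
    PySem.Dict String (PySem.Dict String Int) :=
  let res1 := if res.contains p.1 then res else res.insert p.1 PySem.Dict.empty
  let inner := res1.getD p.1 PySem.Dict.empty
  if !(inner.contains p.2) then res1.insert p.1 (inner.insert p.2 1)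
  else res1.insert p.1 (inner.insert p.2 (inner.getD p.2 0 + 1))

-- B's counter step and reshape step, on the extracted pair
def pvStepC (c : PySem.Dict (String × String) Int) (p : String × String) :
    PySem.Dict (String × String) Int :=
  c.insert p (c.getD p 0 + 1)

def pvStep2 (res : PySem.Dict String (PySem.Dict String Int)) (q : (String × String) × Int) :
    PySem.Dict String (PySem.Dict String Int) :=
  res.insert q.1.1 ((res.getD q.1.1 PySem.Dict.empty).insert q.1.2 q.2)

def pvReshape (c : PySem.Dict (String × String) Int) : PySem.Dict String (PySem.Dict String Int) :=
  c.items.foldl pvStep2 PySem.Dict.empty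


def pvIns (inn : PySem.Dict String Int) (q : (String × String) × Int) : PySem.Dict String Int :=
  inn.insert q.1.2 q.2

theorem pvInner (l : List ((String × String) × Int)) (res : PySem.Dict String (PySem.Dict String Int)) (t : String) :
    (l.foldl pvStep2 res).getD t PySem.Dict.empty =
      (l.filter (fun q => q.1.1 == t)).foldl pvIns (res.getD t PySem.Dict.empty) := by
  induction l generalizing res with
  | nil => rfl
  | cons q l ih =>
      simp only [List.foldl_cons, List.filter_cons]
      rw [ih]
      by_cases h : q.1.1 = t
      · subst h
        simp only [beq_self_eq_true, if_true, List.foldl_cons]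
        rw [show (pvStep2 res q).getD q.1.1 PySem.Dict.empty = (res.getD q.1.1 PySem.Dict.empty).insert q.1.2 q.2 from PySem.Dict.getD_insert_self _ _ _ _]
        rfl
      · have hb : (q.1.1 == t) = false := beq_eq_false_iff_ne.mpr h
        simp only [hb, Bool.false_eq_true, if_false]
        rw [show (pvStep2 res q).getD t PySem.Dict.empty = res.getD t PySem.Dict.empty from PySem.Dict.getD_insert_of_ne _ _ _ (Ne.symm h)]

theorem pvKeys (l : List ((String × String) × Int)) (res : PySem.Dict String (PySem.Dict String Int)) :
    (l.foldl pvStep2 res).keys = PySem.Set.update res.keys (l.map (fun q => q.1.1)) :=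
  PySem.Dict.keys_foldl_insert_key l (fun q => q.1.1)
    (fun d q => (d.getD q.1.1 PySem.Dict.empty).insert q.1.2 q.2) res

theorem pvReshape_keys (c : PySem.Dict (String × String) Int) :
    (pvReshape c).keys = PySem.Set.ofList (c.items.map (fun q => q.1.1)) := by
  rw [pvReshape, pvKeys, PySem.Dict.keys_empty, PySem.Set.ofList_eq_foldl]; rfl

theorem pvInnerKeys (f : List ((String × String) × Int)) (inn : PySem.Dict String Int) :
    (f.foldl pvIns inn).keys = PySem.Set.update inn.keys (f.map (fun q => q.1.2)) :=
  PySem.Dict.keys_foldl_insert_key f (fun q => q.1.2) (fun _ q => q.2) inn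

theorem pvMemPair (l : List ((String × String) × Int)) (p : String × String) :
    (p.2 ∈ (l.filter (fun q => q.1.1 == p.1)).map (fun q => q.1.2)) ↔ p ∈ l.map (fun q => q.1) := by
  simp only [List.mem_map, List.mem_filter, beq_iff_eq]
  constructor
  · rintro ⟨q, ⟨hq, h1⟩, h2⟩; exact ⟨q, hq, Prod.ext_iff.mpr ⟨h1, h2⟩⟩
  · rintro ⟨q, hq, h1⟩; exact ⟨q, ⟨hq, by rw [h1]⟩, by rw [h1]⟩

-- A-step characterisation
theorem pvSA_keys (X : PySem.Dict String (PySem.Dict String Int)) (p : String × String) :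
    (pvStepA X p).keys = if X.contains p.1 then X.keys else X.keys ++ [p.1] := by
  unfold pvStepA
  by_cases h : X.contains p.1
  · simp only [h, if_true]
    split <;> exact PySem.Dict.keys_insert_of_contains _ _ h
  · have h' : X.contains p.1 = false := by simpa using h
    simp only [h', Bool.false_eq_true, if_false]
    split <;>
      rw [PySem.Dict.keys_insert_of_contains _ _ (PySem.Dict.contains_insert_self _ _ _),
        PySem.Dict.keys_insert_of_not_contains _ _ h']

theorem pvSA_getD_self (X : PySem.Dict String (PySem.Dict String Int)) (p : String × String) :
    (pvStepA X p).getD p.1 PySem.Dict.empty =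
      (if (X.getD p.1 PySem.Dict.empty).contains p.2 then
        (X.getD p.1 PySem.Dict.empty).insert p.2 ((X.getD p.1 PySem.Dict.empty).getD p.2 0 + 1)
       else (X.getD p.1 PySem.Dict.empty).insert p.2 1) := by
  unfold pvStepA
  by_cases h : X.contains p.1
  · simp only [h, if_true]
    split <;> rename_i hin <;> simp_all [PySem.Dict.getD_insert_self]
  · have h' : X.contains p.1 = false := by simpa using h
    have he : X.getD p.1 PySem.Dict.empty = PySem.Dict.empty :=
      PySem.Dict.getD_of_not_contains _ _ h'
    simp only [h', Bool.false_eq_true, if_false, he, PySem.Dict.getD_insert_self,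
      PySem.Dict.contains_empty, PySem.Dict.getD_empty, Bool.not_false, if_true]

theorem pvSA_getD_ne (X : PySem.Dict String (PySem.Dict String Int)) (p : String × String)
    (s : String) (hs : s ≠ p.1) :
    (pvStepA X p).getD s PySem.Dict.empty = X.getD s PySem.Dict.empty := by
  unfold pvStepA
  by_cases h : X.contains p.1
  · simp only [h, if_true]
    split <;> exact PySem.Dict.getD_insert_of_ne _ _ _ hs
  · have h' : X.contains p.1 = false := by simpa using h
    simp only [h', Bool.false_eq_true, if_false]
    split <;> rw [PySem.Dict.getD_insert_of_ne _ _ _ hs, PySem.Dict.getD_insert_of_ne _ _ _ hs]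

theorem pvSA_nodup (X : PySem.Dict String (PySem.Dict String Int)) (p : String × String)
    (h : X.keys.Nodup) : (pvStepA X p).keys.Nodup := by
  unfold pvStepA
  by_cases hc : X.contains p.1
  · simp only [hc, if_true]; split <;> exact PySem.Dict.nodup_keys_insert _ _ _ h
  · have h' : X.contains p.1 = false := by simpa using hc
    simp only [h', Bool.false_eq_true, if_false]
    split <;> exact PySem.Dict.nodup_keys_insert _ _ _ (PySem.Dict.nodup_keys_insert _ _ _ h)


theorem pvFoldFresh (f : List ((String × String) × Int)) (inn : PySem.Dict String Int)
    (hnd : (f.map (fun q => q.1.2)).Nodup)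
    (hfresh : ∀ x ∈ f.map (fun q => q.1.2), inn.contains x = false) :
    (f.foldl pvIns inn).items = inn.items ++ f.map (fun q => (q.1.2, q.2)) := by
  induction f generalizing inn with
  | nil => simp
  | cons q f ih =>
      simp only [List.map_cons, List.nodup_cons] at hnd
      have hq : inn.contains q.1.2 = false := hfresh _ (by simp)
      have h1 : (pvIns inn q).items = inn.items ++ [(q.1.2, q.2)] :=
        PySem.Dict.items_insert_of_not_contains _ _ hq
      rw [List.foldl_cons, ih _ hnd.2, h1, List.map_cons, List.append_assoc]
      · rfl
      · intro x hx
        rw [show pvIns inn q = inn.insert q.1.2 q.2 from rfl, PySem.Dict.contains_insert]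
        have hxne : x ≠ q.1.2 := fun he => hnd.1 (he ▸ hx)
        simp only [beq_eq_false_iff_ne.mpr hxne, Bool.false_or]
        exact hfresh _ (List.mem_cons_of_mem _ hx)

theorem pvStep2'_eq :
    (fun (result : PySem.Dict String (PySem.Dict String Int)) (q : (String × String) × Int) =>
      let result := result.setdefault q.1.1 PySem.Dict.empty
      result.insert q.1.1 ((result.getD q.1.1 PySem.Dict.empty).insert q.1.2 q.2)) = pvStep2 := by
  funext res q
  by_cases h : res.contains q.1.1
  · simp only [PySem.Dict.setdefault_of_contains _ _ h]; rfl
  · have h' : res.contains q.1.1 = false := by simpa using h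
    simp only [PySem.Dict.setdefault_of_not_contains _ _ h']
    rw [pvStep2, PySem.Dict.getD_insert_self, PySem.Dict.insert_insert_self,
      PySem.Dict.getD_of_not_contains _ _ h']

theorem pvA_eq (ad : List (List (String × String))) :
    type_response_from_data ad =
      ((ad.map pvPair).foldl pvStepA PySem.Dict.empty).items.map (fun p => (p.1, p.2.items)) := by
  unfold type_response_from_data
  rw [List.foldl_map]
  rfl

theorem pvB_eq (ad : List (List (String × String))) :
    type_response_from_data_alt ad =
      (pvReshape ((ad.map pvPair).foldl pvStepC PySem.Dict.empty)).items.map (fun p => (p.1, p.2.items)) := by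
  unfold type_response_from_data_alt
  rw [List.foldl_map]
  unfold pvReshape
  rw [← pvStep2'_eq]
  rfl


-- Set.ofList over an appended element, as an if
theorem pvOfList_append (xs : List String) (x : String) :
    PySem.Set.ofList (xs ++ [x]) =
      if x ∈ PySem.Set.ofList xs then PySem.Set.ofList xs else PySem.Set.ofList xs ++ [x] := by
  rw [PySem.Set.ofList_eq_foldl (xs ++ [x]), List.foldl_append, ← PySem.Set.ofList_eq_foldl]
  show PySem.Set.add _ x = _
  by_cases h : x ∈ PySem.Set.ofList xs
  · have hc : PySem.Set.contains (PySem.Set.ofList xs) x = true := (PySem.Set.contains_iff _ _).mpr h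
    simp only [PySem.Set.add, hc, if_true, h]
  · have hc : PySem.Set.contains (PySem.Set.ofList xs) x = false := by
      rcases Bool.eq_false_or_eq_true (PySem.Set.contains (PySem.Set.ofList xs) x) with h' | h'
      · exact absurd ((PySem.Set.contains_iff _ _).mp h') h
      · exact h'
    simp only [PySem.Set.add, hc, Bool.false_eq_true, if_false, h]

-- the inner dict of pvReshape c at key t, as an explicit fold
theorem pvReshape_getD (c : PySem.Dict (String × String) Int) (t : String) :
    (pvReshape c).getD t PySem.Dict.empty =
      (c.items.filter (fun q => q.1.1 == t)).foldl pvIns PySem.Dict.empty := by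
  rw [pvReshape, pvInner, PySem.Dict.getD_empty]

theorem pvInnerKeys0 (f : List ((String × String) × Int)) :
    (f.foldl pvIns PySem.Dict.empty).keys = PySem.Set.ofList (f.map (fun q => q.1.2)) := by
  rw [pvInnerKeys, PySem.Dict.keys_empty, PySem.Set.ofList_eq_foldl]; rfl

theorem pvInner_contains (c : PySem.Dict (String × String) Int) (p : String × String) :
    ((pvReshape c).getD p.1 PySem.Dict.empty).contains p.2 = c.contains p := by
  rw [pvReshape_getD]
  have h1 : ((c.items.filter (fun q => q.1.1 == p.1)).foldl pvIns PySem.Dict.empty).contains p.2 = true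
      ↔ c.contains p = true := by
    rw [PySem.Dict.contains_iff_mem_keys, pvInnerKeys0, PySem.Set.mem_ofList, pvMemPair,
      PySem.Dict.contains_iff_mem_keys]
    exact Iff.rfl
  rcases Bool.eq_false_or_eq_true (c.contains p) with h | h <;>
    rcases Bool.eq_false_or_eq_true (((c.items.filter (fun q => q.1.1 == p.1)).foldl pvIns PySem.Dict.empty).contains p.2) with h' | h' <;>
      simp_all

theorem pvSubst_fst (p : String × String) (v : Int) (q : (String × String) × Int) :
    ((if q.1 == p then (p, v) else q) : (String × String) × Int).1 = q.1 := by
  by_cases h : q.1 == p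
  · simp only [h, if_true]; exact (eq_of_beq h).symm
  · simp only [h, Bool.false_eq_true, if_false]

theorem pvFilter_subst (l : List ((String × String) × Int)) (p : String × String) (v : Int) (s : String) :
    ((l.map (fun q => if q.1 == p then (p, v) else q)).filter (fun q => q.1.1 == s)) =
      (l.filter (fun q => q.1.1 == s)).map (fun q => if q.1 == p then (p, v) else q) := by
  rw [List.filter_map]
  congr 1
  apply List.filter_congr
  intro q _
  simp only [Function.comp]
  rw [pvSubst_fst]

-- key single-step lemma: reshaping after one counter bump = one step of A's loop
theorem pvL (c : PySem.Dict (String × String) Int) (p : String × String)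
    (hnd : c.keys.Nodup) : pvReshape (pvStepC c p) = pvStepA (pvReshape c) p := by
  have hC : pvStepC c p = c.insert p (c.getD p 0 + 1) := rfl
  have hndX : (pvReshape c).keys.Nodup := by rw [pvReshape_keys]; exact PySem.Set.nodup_ofList _
  have hndL : (pvReshape (pvStepC c p)).keys.Nodup := by
    rw [pvReshape_keys]; exact PySem.Set.nodup_ofList _
  have hndR : (pvStepA (pvReshape c) p).keys.Nodup := pvSA_nodup _ _ hndX
  have hndI : (c.items.map (fun q => q.1)).Nodup := hnd
  have hXc : ((pvReshape c).contains p.1 = true) ↔ p.1 ∈ PySem.Set.ofList (c.items.map (fun q => q.1.1)) := by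
    rw [PySem.Dict.contains_iff_mem_keys, pvReshape_keys]
  -- keys agree
  have hkeys : (pvReshape (pvStepC c p)).keys = (pvStepA (pvReshape c) p).keys := by
    rw [pvSA_keys, pvReshape_keys, pvReshape_keys, hC]
    by_cases hc : c.contains p = true
    · rw [PySem.Dict.items_insert_of_contains _ _ hc]
      have hm : ((c.items.map (fun q => if q.1 == p then (p, c.getD p 0 + 1) else q)).map (fun q => q.1.1))
          = c.items.map (fun q => q.1.1) := by
        rw [List.map_map]; apply List.map_congr_left; intro q _
        simp only [Function.comp]; rw [pvSubst_fst]
      rw [hm]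
      have hp1 : p.1 ∈ c.items.map (fun q => q.1.1) := by
        rcases List.mem_map.mp ((PySem.Dict.contains_iff_mem_keys _ _).mp hc) with ⟨q, hq, hq1⟩
        exact List.mem_map.mpr ⟨q, hq, by rw [hq1]⟩
      rw [hXc.mpr ((PySem.Set.mem_ofList _ _).mpr hp1)]
      simp
    · have hcf : c.contains p = false := by simpa using hc
      rw [PySem.Dict.items_insert_of_not_contains _ _ hcf, List.map_append]
      show PySem.Set.ofList (c.items.map (fun q => q.1.1) ++ [p.1]) = _
      rw [pvOfList_append]
      by_cases hm : p.1 ∈ PySem.Set.ofList (c.items.map (fun q => q.1.1))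
      · rw [if_pos hm, hXc.mpr hm]; simp
      · rw [if_neg hm]
        have hb : (pvReshape c).contains p.1 = false := by
          rcases Bool.eq_false_or_eq_true ((pvReshape c).contains p.1) with h' | h'
          · exact absurd (hXc.mp h') hm
          · exact h'
        rw [hb]
        simp
  -- lookups agree
  have hgd : ∀ s, (pvReshape (pvStepC c p)).getD s PySem.Dict.empty
      = (pvStepA (pvReshape c) p).getD s PySem.Dict.empty := by
    intro s
    by_cases hs : s = p.1
    · subst hs
      rw [pvSA_getD_self, pvInner_contains, pvReshape_getD, pvReshape_getD, hC]
      by_cases hc : c.contains p = true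
      · -- existing (type, region): bump in place
        rcases List.mem_map.mp ((PySem.Dict.contains_iff_mem_keys _ _).mp hc) with ⟨q0, hq0, hq01⟩
        have hgp : c.getD p 0 = q0.2 := by
          have hmem : (p, q0.2) ∈ c.items := by rw [← hq01]; simpa using hq0
          exact PySem.Dict.getD_of_mem_items _ hmem hnd 0
        have hall : ∀ q ∈ c.items.filter (fun q => q.1.1 == p.1), q.1.1 = p.1 := by
          intro q hq
          have := (List.mem_filter.mp hq).2
          simpa using this
        have hq0f : q0 ∈ c.items.filter (fun q => q.1.1 == p.1) := by
          apply List.mem_filter.mpr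
          refine ⟨hq0, ?_⟩
          rw [hq01]; simp
        have hfk : ((c.items.filter (fun q => q.1.1 == p.1)).map (fun q => q.1)).Nodup :=
          (List.filter_sublist.map _).nodup hndI
        have hfr : ((c.items.filter (fun q => q.1.1 == p.1)).map (fun q => q.1.2)).Nodup := by
          have he : (c.items.filter (fun q => q.1.1 == p.1)).map (fun q => q.1.2)
              = ((c.items.filter (fun q => q.1.1 == p.1)).map (fun q => q.1)).map (fun k => k.2) := by
            rw [List.map_map]; rfl
          rw [he]
          refine List.Nodup.map_on ?_ hfk
          intro x hx y hy hxy
          rcases List.mem_map.mp hx with ⟨qx, hqx, hqx1⟩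
          rcases List.mem_map.mp hy with ⟨qy, hqy, hqy1⟩
          have hx1 : x.1 = p.1 := by rw [← hqx1]; exact hall _ hqx
          have hy1 : y.1 = p.1 := by rw [← hqy1]; exact hall _ hqy
          exact Prod.ext_iff.mpr ⟨hx1.trans hy1.symm, hxy⟩
        have hinnItems : ((c.items.filter (fun q => q.1.1 == p.1)).foldl pvIns PySem.Dict.empty).items
            = (c.items.filter (fun q => q.1.1 == p.1)).map (fun q => (q.1.2, q.2)) := by
          have h0 := pvFoldFresh (c.items.filter (fun q => q.1.1 == p.1)) PySem.Dict.empty hfr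
            (fun x _ => PySem.Dict.contains_empty x)
          simpa using h0
        have hinnNodup : ((c.items.filter (fun q => q.1.1 == p.1)).foldl pvIns PySem.Dict.empty).keys.Nodup := by
          rw [pvInnerKeys0]; exact PySem.Set.nodup_ofList _
        have hgr : ((c.items.filter (fun q => q.1.1 == p.1)).foldl pvIns PySem.Dict.empty).getD p.2 0 = q0.2 := by
          have hmem : (p.2, q0.2) ∈ ((c.items.filter (fun q => q.1.1 == p.1)).foldl pvIns PySem.Dict.empty).items := by
            rw [hinnItems]
            exact List.mem_map.mpr ⟨q0, hq0f, by rw [hq01]⟩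
          exact PySem.Dict.getD_of_mem_items _ hmem hinnNodup 0
        rw [hc, if_pos rfl, PySem.Dict.items_insert_of_contains _ _ hc, pvFilter_subst]
        have hcin : ((c.items.filter (fun q => q.1.1 == p.1)).foldl pvIns PySem.Dict.empty).contains p.2 = true := by
          rw [PySem.Dict.contains_iff_mem_keys, pvInnerKeys0, PySem.Set.mem_ofList]
          exact List.mem_map.mpr ⟨q0, hq0f, by rw [hq01]⟩
        have hfr' : (((c.items.filter (fun q => q.1.1 == p.1)).map (fun q => if q.1 == p then (p, c.getD p 0 + 1) else q)).map (fun q => q.1.2)).Nodup := by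
          have he : ((c.items.filter (fun q => q.1.1 == p.1)).map (fun q => if q.1 == p then (p, c.getD p 0 + 1) else q)).map (fun q => q.1.2)
              = (c.items.filter (fun q => q.1.1 == p.1)).map (fun q => q.1.2) := by
            rw [List.map_map]
            apply List.map_congr_left; intro q _
            simp only [Function.comp]
            exact congrArg Prod.snd (pvSubst_fst p _ q)
          rw [he]; exact hfr
        have hLitems : (((c.items.filter (fun q => q.1.1 == p.1)).map (fun q => if q.1 == p then (p, c.getD p 0 + 1) else q)).foldl pvIns PySem.Dict.empty).items
            = ((c.items.filter (fun q => q.1.1 == p.1)).map (fun q => if q.1 == p then (p, c.getD p 0 + 1) else q)).map (fun q => (q.1.2, q.2)) := by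
          have h0 := pvFoldFresh _ PySem.Dict.empty hfr' (fun x _ => PySem.Dict.contains_empty x)
          simpa using h0
        apply PySem.Dict.ext
        rw [hLitems, PySem.Dict.items_insert_of_contains _ _ hcin, hinnItems, hgr, hgp,
          List.map_map, List.map_map]
        apply List.map_congr_left
        intro q hq
        have hq11 : q.1.1 = p.1 := hall _ hq
        by_cases h : q.1 = p
        · have hb : (q.1 == p) = true := beq_iff_eq.mpr h
          simp only [Function.comp, hb, if_true]
          have hr : q.1.2 = p.2 := by rw [h]
          simp [hr]
        · have hb : (q.1 == p) = false := beq_eq_false_iff_ne.mpr h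
          have hr : (q.1.2 == p.2) = false := by
            apply beq_eq_false_iff_ne.mpr
            intro he
            exact h (Prod.ext_iff.mpr ⟨hq11, he⟩)
          simp only [Function.comp, hb, Bool.false_eq_true, if_false, hr]
      · -- new (type, region): first occurrence appends
        have hcf : c.contains p = false := by simpa using hc
        rw [hcf, if_neg Bool.false_ne_true,
          PySem.Dict.items_insert_of_not_contains _ _ hcf, List.filter_append]
        have hone : [(p, c.getD p 0 + 1)].filter (fun q => q.1.1 == p.1) = [(p, c.getD p 0 + 1)] := by
          simp
        rw [hone, List.foldl_append, PySem.Dict.getD_of_not_contains _ _ hcf]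
        show ((c.items.filter (fun q => q.1.1 == p.1)).foldl pvIns PySem.Dict.empty).insert p.2 (0 + 1) = _
        rw [zero_add]
    · -- a different type key: untouched
      rw [pvSA_getD_ne _ _ _ hs, pvReshape_getD, pvReshape_getD, hC]
      congr 1
      by_cases hc : c.contains p = true
      · rw [PySem.Dict.items_insert_of_contains _ _ hc, pvFilter_subst]
        have hid : ∀ q ∈ c.items.filter (fun q => q.1.1 == s),
            (if q.1 == p then (p, c.getD p 0 + 1) else q) = q := by
          intro q hq
          have hq11 : q.1.1 = s := by have := (List.mem_filter.mp hq).2; simpa using this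
          have hb : (q.1 == p) = false := by
            apply beq_eq_false_iff_ne.mpr
            intro he
            exact hs (by rw [← hq11, he])
          rw [hb]; simp
        rw [List.map_congr_left hid]
        simp
      · have hcf : c.contains p = false := by simpa using hc
        rw [PySem.Dict.items_insert_of_not_contains _ _ hcf, List.filter_append]
        have hone : [(p, c.getD p 0 + 1)].filter (fun q => q.1.1 == s) = [] := by
          simp only [List.filter_cons, List.filter_nil]
          rw [show ((p, c.getD p 0 + 1).1.1 == s) = false from beq_eq_false_iff_ne.mpr (Ne.symm hs)]
          simp
        rw [hone, List.append_nil]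
  apply PySem.Dict.ext
  rw [PySem.Dict.items_eq_map_keys _ hndL PySem.Dict.empty,
    PySem.Dict.items_eq_map_keys _ hndR PySem.Dict.empty, hkeys]
  exact List.map_congr_left (fun k _ => by rw [hgd k])

theorem pvM (ps : List (String × String)) (c : PySem.Dict (String × String) Int)
    (hnd : c.keys.Nodup) :
    ps.foldl pvStepA (pvReshape c) = pvReshape (ps.foldl pvStepC c) := by
  induction ps generalizing c with
  | nil => rfl
  | cons p ps ih =>
      simp only [List.foldl_cons, ← pvL c p hnd]
      exact ih _ (PySem.Dict.nodup_keys_insert _ _ _ hnd)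

-- ===== VERDICT (by name: the statement is the Claim_ definition above) =====
theorem type_response_from_data_spec : Claim_equal_type_response_from_data := by
  intro ad _ _
  unfold Spec_type_response_from_data
  rw [pvA_eq, pvB_eq, ← pvM _ _ PySem.Dict.nodup_keys_empty]
  rfl
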